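-- pv_equiv track=rewrite | github.com/dvillano2/z3_points | structures.py | final_line_translates
-- ===== SOURCE A (Python) =====
-- from typing import List
-- from typing import Tuple
--
-- def expand_index(index: int, prime: int) -> Tuple[int, int, int]:
--     z, yx = divmod(index, prime**2)
--     y, x = divmod(yx, prime)
--     return (x, y, z)
--
-- def shift_point(point: int, shift: int, prime: int) -> int:
--     "returns point + int, all in index form"
--     point_coords = expand_index(point, prime)
--     shift_coords = expand_index(shift, prime)
--     shifted_point = 0
--     for i, (point_coord, shift_coord) in enumerate(
--         zip(point_coords, shift_coords)
--     ):
--         shifted_point += ((point_coord + shift_coord) % prime) * (prime**i)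
--     return shifted_point
--
-- def final_line_translates(
--     prime: int, line: List[int]
-- ) -> List[List[List[int]]]:
--     translates = [[[0] for _ in range(prime)] for _ in range(prime)]
--     for y in range(prime):
--         for z in range(prime):
--             translates[z][y] = [
--                 shift_point(point, y * prime + z * prime**2, prime)
--                 for point in line
--             ]
--     return translates
-- ===== SOURCE B (Python) =====
-- def final_line_translates(prime, line):
--     if prime <= 0:
--         return []
--     p2 = prime * prime
--     p3 = p2 * prime
--
--     def bump(row, step, limit):
--         # add `step` to the digit below `limit`, wrapping around on overflow
--         return [v + step if v % limit + step < limit else v + step - limit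
--                 for v in row]
--
--     base = []
--     for point in line:
--         z0, yx = divmod(point, p2)
--         y0, x = divmod(yx, prime)
--         base.append(x + y0 * prime + (z0 % prime) * p2)
--
--     out = []
--     zrow = base
--     for _ in range(prime):
--         plane = []
--         yrow = zrow
--         for _ in range(prime):
--             plane.append(yrow)
--             yrow = bump(yrow, prime, p2)
--         out.append(plane)
--         zrow = bump(zrow, p2, p3)
--     return out
-- ===== Notes on version B (the rewrite author's own statement) =====
-- stated objective: faster
-- what changed: B computes only the (y=0,z=0) base row by digit expansion and derives every other row incrementally from the previous row by a constant-step bump-with-wraparound update (add prime wrapping the middle base-prime digit, add prime^2 wrapping the top digit), instead of re-expanding both the point and the shift index via shift_point/expand_index for every (y,z,point) cell; intended as faster, measured ~11.9x at the largest size both finished (n=256), both time out on the very largest generated inputs.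
import Mathlib
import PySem

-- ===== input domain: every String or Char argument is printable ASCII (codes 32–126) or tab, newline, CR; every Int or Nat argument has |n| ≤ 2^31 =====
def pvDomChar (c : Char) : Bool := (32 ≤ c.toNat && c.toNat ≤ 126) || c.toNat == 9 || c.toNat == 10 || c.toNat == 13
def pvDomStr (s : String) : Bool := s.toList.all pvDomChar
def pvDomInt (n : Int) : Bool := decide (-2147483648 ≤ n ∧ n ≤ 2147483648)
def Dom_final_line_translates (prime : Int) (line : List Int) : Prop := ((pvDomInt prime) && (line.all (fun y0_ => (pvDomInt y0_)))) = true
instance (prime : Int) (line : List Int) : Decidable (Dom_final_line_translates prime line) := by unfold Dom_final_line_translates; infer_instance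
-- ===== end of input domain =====

-- B computes only the (y=0,z=0) base row by digit expansion and derives every other row
-- incrementally by a constant-step bump-with-wraparound update; return values proved equal.

-- ===== PORT A =====
-- divmod ported via floordiv/mod (exact for nonzero divisor; every call A makes has prime ≥ 1,
-- since the loops of final_line_translates run only when range(prime) is nonempty)
def expand_index (index : Int) (prime : Int) : Int × Int × Int :=
  let z := PySem.Int.floordiv index (prime ^ 2)
  let yx := PySem.Int.mod index (prime ^ 2)
  let y := PySem.Int.floordiv yx prime
  let x := PySem.Int.mod yx prime
  (x, y, z)

def shift_point (point : Int) (shift : Int) (prime : Int) : Int :=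
  let pc := expand_index point prime
  let sc := expand_index shift prime
  -- zip of the two 3-tuples, then enumerate
  -- prime**i : enumerate index i ∈ {0,1,2} is nonneg, so .toNat is exact
  (PySem.List.enumerate [(pc.1, sc.1), (pc.2.1, sc.2.1), (pc.2.2, sc.2.2)]).foldl
    (fun acc ip => acc + (PySem.Int.mod (ip.2.1 + ip.2.2) prime) * prime ^ ip.1.toNat) 0

def final_line_translates (prime : Int) (line : List Int) : List (List (List Int)) :=
  let translates := (PySem.List.pyRange 0 prime 1).map
    (fun _ => (PySem.List.pyRange 0 prime 1).map (fun _ => ([0] : List Int)))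
  -- translates[z][y] = row : z, y come from range(prime), hence in range and nonnegative
  (PySem.List.pyRange 0 prime 1).foldl (fun t y =>
    (PySem.List.pyRange 0 prime 1).foldl (fun t z =>
      t.set z.toNat ((t.getD z.toNat []).set y.toNat
        (line.map (fun point => shift_point point (y * prime + z * prime ^ 2) prime)))) t)
    translates

-- ===== PORT B =====
-- bump(row, step, limit): add `step` to the digit below `limit`, wrapping around on overflow
def flt_bump (row : List Int) (step limit : Int) : List Int :=
  row.map (fun v => if PySem.Int.mod v limit + step < limit then v + step else v + step - limit)

def final_line_translates_alt (prime : Int) (line : List Int) : List (List (List Int)) :=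
  if prime ≤ 0 then [] else
  let p2 := prime * prime
  let p3 := p2 * prime
  let base := line.map (fun point =>
    let z0 := PySem.Int.floordiv point p2
    let yx := PySem.Int.mod point p2
    let y0 := PySem.Int.floordiv yx prime
    let x := PySem.Int.mod yx prime
    x + y0 * prime + (PySem.Int.mod z0 prime) * p2)
  let res := (PySem.List.pyRange 0 prime 1).foldl (fun s _ =>
    let inner := (PySem.List.pyRange 0 prime 1).foldl (fun t _ =>
      (t.1 ++ [t.2], flt_bump t.2 prime p2)) (([] : List (List Int)), s.2)
    (s.1 ++ [inner.1], flt_bump s.2 p2 p3)) (([] : List (List (List Int))), base)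
  res.1

-- ===== PRECONDITION & SPEC =====
def Spec_final_line_translates (prime : Int) (line : List Int) (out : List (List (List Int))) : Prop := out = final_line_translates_alt prime line
instance (prime : Int) (line : List Int) (out : List (List (List Int))) : Decidable (Spec_final_line_translates prime line out) := by unfold Spec_final_line_translates; infer_instance

-- ===== CLAIM (what is proved, stated in full; the proofs are below) =====
def Claim_equal_final_line_translates : Prop := ∀ (prime : Int) (line : List Int), Dom_final_line_translates prime line → Spec_final_line_translates prime line (final_line_translates prime line)

-- ===== LEMMAS AND PROOFS =====

-- the value of cell (z, y) for a given point (the common target of both proofs)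
def flt_cell (p z y pt : Int) : Int :=
  PySem.Int.mod (PySem.Int.mod pt (p * p)) p
  + PySem.Int.mod (PySem.Int.floordiv (PySem.Int.mod pt (p * p)) p + y) p * p
  + PySem.Int.mod (PySem.Int.mod (PySem.Int.floordiv pt (p * p)) p + z) p * (p * p)

-- reading cell a of a table that is a map over range(n)
theorem pv_getD_map_pyRange {A : Type} (n a : Int) (f : Int → A) (d : A)
    (h0 : 0 ≤ a) (ha : a < n) :
    ((PySem.List.pyRange 0 n 1).map f).getD a.toNat d = f a := by
  have hk : a.toNat < (n - 0).toNat := by omega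
  rw [PySem.List.pyRange_one, List.map_map, List.getD_eq_getElem?_getD,
      List.getElem?_map, List.getElem?_range hk]
  simp [Int.toNat_of_nonneg h0]

-- writing cell a of a table that is a map over range(n)
theorem pv_set_map_pyRange {A : Type} (n a : Int) (f : Int → A) (v : A)
    (h0 : 0 ≤ a) (_ha : a < n) :
    ((PySem.List.pyRange 0 n 1).map f).set a.toNat v
    = (PySem.List.pyRange 0 n 1).map (fun w => if w = a then v else f w) := by
  apply List.ext_getElem
  · simp
  · intro k h1 h2
    simp only [List.length_set, List.length_map, PySem.List.length_pyRange_one] at h1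
    rw [List.getElem_set, List.getElem_map, List.getElem_map,
        PySem.List.getElem_pyRange_one]
    split_ifs with e1 e2 e2
    · rfl
    · exact absurd (by omega : (0:Int) + k = a) e2
    · exact absurd (by omega : a.toNat = k) e1
    · rfl

-- A's inner z-loop: set slot y of every row z ≥ a
theorem pv_inner_loop (n y : Int) (Rv : Int → Int → List Int) :
    ∀ (m : Nat) (a : Int) (g : Int → List (List Int)), 0 ≤ a → a ≤ n → m = (n - a).toNat →
    (PySem.List.pyRange a n 1).foldl
      (fun t z => t.set z.toNat ((t.getD z.toNat []).set y.toNat (Rv z y)))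
      ((PySem.List.pyRange 0 n 1).map g)
    = (PySem.List.pyRange 0 n 1).map
        (fun w => if a ≤ w then (g w).set y.toNat (Rv w y) else g w) := by
  intro m
  induction m with
  | zero =>
    intro a g h0 ha hm
    rw [PySem.List.pyRange_one_eq_nil (show n ≤ a by omega)]
    simp only [List.foldl_nil]
    apply List.map_congr_left
    intro w hw
    rw [PySem.List.mem_pyRange_one] at hw
    rw [if_neg (by omega)]
  | succ m ih =>
    intro a g h0 ha hm
    rw [PySem.List.pyRange_one_cons (by omega : a < n)]
    simp only [List.foldl_cons]
    rw [pv_getD_map_pyRange n a g [] h0 (by omega),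
        pv_set_map_pyRange n a g ((g a).set y.toNat (Rv a y)) h0 (by omega),
        ih (a + 1) _ (by omega) (by omega) (by omega)]
    apply List.map_congr_left
    intro w _
    rcases lt_trichotomy w a with h | h | h
    · rw [if_neg (by omega : ¬ a + 1 ≤ w), if_neg (by omega : ¬ w = a),
          if_neg (by omega : ¬ a ≤ w)]
    · subst h
      rw [if_neg (by omega : ¬ w + 1 ≤ w), if_pos rfl, if_pos le_rfl]
    · rw [if_pos (by omega : a + 1 ≤ w), if_neg (by omega : ¬ w = a),
          if_pos (by omega : a ≤ w)]

-- a row after a plain set-loop over range(n)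
theorem pv_row_loop (n z : Int) (Rv : Int → Int → List Int) :
    ∀ (m : Nat) (a : Int) (g : Int → List Int), 0 ≤ a → a ≤ n → m = (n - a).toNat →
    (PySem.List.pyRange a n 1).foldl (fun r y => r.set y.toNat (Rv z y))
      ((PySem.List.pyRange 0 n 1).map g)
    = (PySem.List.pyRange 0 n 1).map (fun w => if a ≤ w then Rv z w else g w) := by
  intro m
  induction m with
  | zero =>
    intro a g h0 ha hm
    rw [PySem.List.pyRange_one_eq_nil (show n ≤ a by omega)]
    simp only [List.foldl_nil]
    apply List.map_congr_left
    intro w hw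
    rw [PySem.List.mem_pyRange_one] at hw
    rw [if_neg (by omega)]
  | succ m ih =>
    intro a g h0 ha hm
    rw [PySem.List.pyRange_one_cons (by omega : a < n)]
    simp only [List.foldl_cons]
    rw [pv_set_map_pyRange n a g (Rv z a) h0 (by omega),
        ih (a + 1) _ (by omega) (by omega) (by omega)]
    apply List.map_congr_left
    intro w _
    rcases lt_trichotomy w a with h | h | h
    · rw [if_neg (by omega : ¬ a + 1 ≤ w), if_neg (by omega : ¬ w = a),
          if_neg (by omega : ¬ a ≤ w)]
    · subst h
      rw [if_neg (by omega : ¬ w + 1 ≤ w), if_pos rfl, if_pos le_rfl]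
    · rw [if_pos (by omega : a + 1 ≤ w), if_pos (by omega : a ≤ w)]

-- A's outer y-loop factors into an independent per-row loop
theorem pv_outer_loop (n : Int) (Rv : Int → Int → List Int) :
    ∀ (m : Nat) (a : Int) (h : Int → List (List Int)), 0 ≤ a → a ≤ n → m = (n - a).toNat →
    (PySem.List.pyRange a n 1).foldl (fun t y =>
      (PySem.List.pyRange 0 n 1).foldl
        (fun t z => t.set z.toNat ((t.getD z.toNat []).set y.toNat (Rv z y))) t)
      ((PySem.List.pyRange 0 n 1).map h)
    = (PySem.List.pyRange 0 n 1).map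
        (fun z => (PySem.List.pyRange a n 1).foldl (fun r y => r.set y.toNat (Rv z y)) (h z)) := by
  intro m
  induction m with
  | zero =>
    intro a h h0 ha hm
    rw [PySem.List.pyRange_one_eq_nil (show n ≤ a by omega)]
    simp
  | succ m ih =>
    intro a h h0 ha hm
    rw [PySem.List.pyRange_one_cons (by omega : a < n)]
    simp only [List.foldl_cons]
    rw [pv_inner_loop n a Rv (n - 0).toNat 0 h le_rfl (by omega) (by omega),
        ih (a + 1) _ (by omega) (by omega) (by omega)]
    apply List.map_congr_left
    intro z hz
    rw [PySem.List.mem_pyRange_one] at hz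
    rw [if_pos hz.1]

-- shift_point with shift y*p + z*p^2 equals the direct coordinate formula flt_cell
theorem pv_shift_eq (p y z pt : Int) (hp : 0 < p) (hy : 0 ≤ y) (hy' : y < p)
    (_hz : 0 ≤ z) (_hz' : z < p) :
    shift_point pt (y * p + z * p ^ 2) p = flt_cell p z y pt := by
  simp only [shift_point, expand_index, flt_cell, PySem.List.enumerate_cons,
    PySem.List.enumerate_nil, List.foldl_cons, List.foldl_nil]
  norm_num
  have hp2 : (0:Int) < p ^ 2 := by positivity
  have hyp : 0 ≤ y * p ∧ y * p < p ^ 2 := by constructor <;> nlinarith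
  have e1 : PySem.Int.floordiv (y * p + z * p ^ 2) (p ^ 2) = z := by
    rw [PySem.Int.floordiv_eq_iff_of_pos hp2]
    constructor <;> nlinarith
  have e2 : PySem.Int.mod (y * p + z * p ^ 2) (p ^ 2) = y * p := by
    rw [PySem.Int.mod_eq_emod_of_pos hp2, Int.add_mul_emod_self_right,
        Int.emod_eq_of_lt hyp.1 hyp.2]
  rw [e1, e2]
  have e3 : PySem.Int.floordiv (y * p) p = y := by
    rw [PySem.Int.floordiv_eq_iff_of_pos hp]
    constructor <;> nlinarith
  have e4 : PySem.Int.mod (y * p) p = 0 := by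
    rw [PySem.Int.mod_eq_emod_of_pos hp, Int.mul_emod_left]
  rw [e3, e4]
  have hpp : (p:Int) ^ 2 = p * p := sq p
  have h0 : ∀ a : Int, a % p % p = a % p := fun a => Int.emod_emod_of_dvd a dvd_rfl
  have hppos : (0:Int) < p * p := by positivity
  simp only [PySem.Int.mod_eq_emod_of_pos hp, PySem.Int.mod_eq_emod_of_pos hppos, hpp, add_zero]
  rw [show Int.toNat 2 = 2 from rfl, hpp]
  rw [h0]
  conv_rhs => rw [Int.add_emod (PySem.Int.floordiv pt (p * p) % p) z p, h0, ← Int.add_emod]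

-- (m % p + c) % p = (m + c) % p
theorem pv_emod_add (p m c : Int) : (m % p + c) % p = (m + c) % p := by
  have h : m % p + c = (m + c) + p * (-(m / p)) := by rw [Int.emod_def]; ring
  rw [h, Int.add_mul_emod_self_left]

-- one bump step on a three-digit value: the middle digit advances cyclically
theorem pv_bump_val_y (p x a b : Int) (hp : 0 < p) (hx : 0 ≤ x) (hx' : x < p)
    (ha : 0 ≤ a) (ha' : a < p) (hb : 0 ≤ b) (hb' : b < p) :
    (if PySem.Int.mod (x + a * p + b * (p * p)) (p * p) + p < p * p
     then x + a * p + b * (p * p) + p else x + a * p + b * (p * p) + p - p * p)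
    = x + (a + 1) % p * p + b * (p * p) := by
  have hpp : (0:Int) < p * p := by positivity
  have hm : PySem.Int.mod (x + a * p + b * (p * p)) (p * p) = x + a * p := by
    rw [PySem.Int.mod_eq_emod_of_pos hpp, Int.add_mul_emod_self_right,
        Int.emod_eq_of_lt (by nlinarith) (by nlinarith)]
  rw [hm]
  by_cases hc : a < p - 1
  · rw [if_pos (by nlinarith), Int.emod_eq_of_lt (by omega) (by omega)]
    ring
  · have hae : a = p - 1 := by omega
    subst hae
    rw [if_neg (by nlinarith), show (p - 1 + 1) % p = 0 by simp]
    ring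

-- one bump step on a three-digit value: the top digit advances cyclically
theorem pv_bump_val_z (p x a b : Int) (hp : 0 < p) (hx : 0 ≤ x) (hx' : x < p)
    (ha : 0 ≤ a) (ha' : a < p) (hb : 0 ≤ b) (hb' : b < p) :
    (if PySem.Int.mod (x + a * p + b * (p * p)) (p * p * p) + p * p < p * p * p
     then x + a * p + b * (p * p) + p * p else x + a * p + b * (p * p) + p * p - p * p * p)
    = x + a * p + (b + 1) % p * (p * p) := by
  have hppp : (0:Int) < p * p * p := by positivity
  have hm : PySem.Int.mod (x + a * p + b * (p * p)) (p * p * p) = x + a * p + b * (p * p) := by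
    rw [PySem.Int.mod_eq_emod_of_pos hppp,
        Int.emod_eq_of_lt (by nlinarith) (by nlinarith)]
  rw [hm]
  by_cases hc : b < p - 1
  · rw [if_pos (by nlinarith), Int.emod_eq_of_lt (by omega) (by omega)]
    ring
  · have hbe : b = p - 1 := by omega
    subst hbe
    rw [if_neg (by nlinarith), show (p - 1 + 1) % p = 0 by simp]
    ring

-- digit bounds of flt_cell's three components
theorem pv_cell_digits (p z y pt : Int) (hp : 0 < p) :
    0 ≤ PySem.Int.mod (PySem.Int.mod pt (p * p)) p ∧ PySem.Int.mod (PySem.Int.mod pt (p * p)) p < p ∧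
    0 ≤ PySem.Int.mod (PySem.Int.floordiv (PySem.Int.mod pt (p * p)) p + y) p ∧
    PySem.Int.mod (PySem.Int.floordiv (PySem.Int.mod pt (p * p)) p + y) p < p ∧
    0 ≤ PySem.Int.mod (PySem.Int.mod (PySem.Int.floordiv pt (p * p)) p + z) p ∧
    PySem.Int.mod (PySem.Int.mod (PySem.Int.floordiv pt (p * p)) p + z) p < p := by
  simp only [PySem.Int.mod_eq_emod_of_pos hp]
  refine ⟨Int.emod_nonneg _ (by omega), Int.emod_lt_of_pos _ hp,
    Int.emod_nonneg _ (by omega), Int.emod_lt_of_pos _ hp,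
    Int.emod_nonneg _ (by omega), Int.emod_lt_of_pos _ hp⟩

-- bumping a row of cells by (prime, prime^2) advances y
theorem pv_bump_row_y (p z y : Int) (line : List Int) (hp : 0 < p) :
    flt_bump (line.map (flt_cell p z y)) p (p * p) = line.map (flt_cell p z (y + 1)) := by
  rw [flt_bump, List.map_map]
  apply List.map_congr_left
  intro pt _
  obtain ⟨h1, h2, h3, h4, h5, h6⟩ := pv_cell_digits p z y pt hp
  simp only [Function.comp_apply, flt_cell]
  rw [pv_bump_val_y p _ _ _ hp h1 h2 h3 h4 h5 h6]
  congr 2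
  simp only [PySem.Int.mod_eq_emod_of_pos hp]
  rw [pv_emod_add]
  ring_nf

-- bumping a row of cells by (prime^2, prime^3) advances z
theorem pv_bump_row_z (p z y : Int) (line : List Int) (hp : 0 < p) :
    flt_bump (line.map (flt_cell p z y)) (p * p) (p * p * p) = line.map (flt_cell p (z + 1) y) := by
  rw [flt_bump, List.map_map]
  apply List.map_congr_left
  intro pt _
  obtain ⟨h1, h2, h3, h4, h5, h6⟩ := pv_cell_digits p z y pt hp
  simp only [Function.comp_apply, flt_cell]
  rw [pv_bump_val_z p _ _ _ hp h1 h2 h3 h4 h5 h6]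
  congr 2
  simp only [PySem.Int.mod_eq_emod_of_pos hp]
  rw [pv_emod_add]
  ring_nf

-- B's inner append/bump loop produces the rows for y = a, a+1, …, p-1 in order
theorem pv_alt_inner (p z : Int) (line : List Int) (hp : 0 < p) :
    ∀ (m : Nat) (a : Int) (acc : List (List Int)), 0 ≤ a → a ≤ p → m = (p - a).toNat →
    (PySem.List.pyRange a p 1).foldl
      (fun t _ => (t.1 ++ [t.2], flt_bump t.2 p (p * p)))
      (acc, line.map (flt_cell p z a))
    = (acc ++ (PySem.List.pyRange a p 1).map (fun y => line.map (flt_cell p z y)),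
       line.map (flt_cell p z p)) := by
  intro m
  induction m with
  | zero =>
    intro a acc h0 ha hm
    have hap : a = p := by omega
    subst hap
    rw [PySem.List.pyRange_one_eq_nil le_rfl]
    simp
  | succ m ih =>
    intro a acc h0 ha hm
    rw [PySem.List.pyRange_one_cons (by omega : a < p)]
    simp only [List.foldl_cons, List.map_cons]
    rw [pv_bump_row_y p z a line hp,
        ih (a + 1) (acc ++ [line.map (flt_cell p z a)]) (by omega) (by omega) (by omega),
        List.append_assoc]
    rfl

-- B's outer append/bump loop produces the planes for z = a, a+1, …, p-1 in order
theorem pv_alt_outer (p : Int) (line : List Int) (hp : 0 < p) :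
    ∀ (m : Nat) (a : Int) (acc : List (List (List Int))), 0 ≤ a → a ≤ p → m = (p - a).toNat →
    (PySem.List.pyRange a p 1).foldl
      (fun s _ =>
        let inner := (PySem.List.pyRange 0 p 1).foldl
          (fun t _ => (t.1 ++ [t.2], flt_bump t.2 p (p * p)))
          (([] : List (List Int)), s.2)
        (s.1 ++ [inner.1], flt_bump s.2 (p * p) (p * p * p)))
      (acc, line.map (flt_cell p a 0))
    = (acc ++ (PySem.List.pyRange a p 1).map
        (fun z => (PySem.List.pyRange 0 p 1).map (fun y => line.map (flt_cell p z y))),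
       line.map (flt_cell p p 0)) := by
  intro m
  induction m with
  | zero =>
    intro a acc h0 ha hm
    have hap : a = p := by omega
    subst hap
    rw [PySem.List.pyRange_one_eq_nil le_rfl]
    simp
  | succ m ih =>
    intro a acc h0 ha hm
    rw [PySem.List.pyRange_one_cons (by omega : a < p)]
    simp only [List.foldl_cons, List.map_cons]
    rw [pv_alt_inner p a line hp (p - 0).toNat 0 [] le_rfl (by omega) (by omega)]
    simp only [List.nil_append]
    rw [pv_bump_row_z p a 0 line hp,
        ih (a + 1) _ (by omega) (by omega) (by omega), List.append_assoc]
    rfl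

-- B's base row is the (z=0, y=0) row of cells
theorem pv_base_eq (p : Int) (line : List Int) (hp : 0 < p) :
    line.map (fun point =>
      PySem.Int.mod (PySem.Int.mod point (p * p)) p
      + PySem.Int.floordiv (PySem.Int.mod point (p * p)) p * p
      + PySem.Int.mod (PySem.Int.floordiv point (p * p)) p * (p * p))
    = line.map (flt_cell p 0 0) := by
  apply List.map_congr_left
  intro pt _
  simp only [flt_cell, add_zero]
  congr 2
  · have hpp : (0:Int) < p * p := by positivity
    have hd : 0 ≤ PySem.Int.floordiv (PySem.Int.mod pt (p * p)) p ∧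
        PySem.Int.floordiv (PySem.Int.mod pt (p * p)) p < p := by
      have hm : 0 ≤ PySem.Int.mod pt (p * p) ∧ PySem.Int.mod pt (p * p) < p * p := by
        rw [PySem.Int.mod_eq_emod_of_pos hpp]
        exact ⟨Int.emod_nonneg _ (by positivity), Int.emod_lt_of_pos _ hpp⟩
      rw [PySem.Int.floordiv_eq_ediv_of_pos hp]
      constructor
      · exact Int.ediv_nonneg hm.1 (by omega)
      · exact Int.ediv_lt_of_lt_mul hp (by nlinarith [hm.2])
    rw [PySem.Int.mod_eq_emod_of_pos hp, Int.emod_eq_of_lt hd.1 hd.2]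
  · simp only [PySem.Int.mod_eq_emod_of_pos hp]
    rw [Int.emod_emod_of_dvd _ dvd_rfl]

-- ===== VERDICT (by name: the statement is the Claim_ definition above) =====
theorem final_line_translates_spec : Claim_equal_final_line_translates := by
  intro prime line _
  unfold Spec_final_line_translates
  simp only [final_line_translates, final_line_translates_alt]
  by_cases hp : prime ≤ 0
  · rw [if_pos hp, PySem.List.pyRange_one_eq_nil (by omega : prime ≤ (0:Int))]
    simp
  · have hp' : 0 < prime := by omega
    rw [if_neg hp]
    rw [pv_outer_loop prime
      (fun z y => line.map (fun point => shift_point point (y * prime + z * prime ^ 2) prime))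
      (prime - 0).toNat 0 _ le_rfl (by omega) rfl]
    rw [pv_base_eq prime line hp',
        pv_alt_outer prime line hp' (prime - 0).toNat 0 [] le_rfl (by omega) rfl]
    simp only [List.nil_append]
    apply List.map_congr_left
    intro z hz
    rw [PySem.List.mem_pyRange_one] at hz
    rw [pv_row_loop prime z
      (fun z y => line.map (fun point => shift_point point (y * prime + z * prime ^ 2) prime))
      (prime - 0).toNat 0 _ le_rfl (by omega) rfl]
    apply List.map_congr_left
    intro y hy
    rw [PySem.List.mem_pyRange_one] at hy
    rw [if_pos hy.1]
    apply List.map_congr_left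
    intro pt _
    exact pv_shift_eq prime y z pt hp' hy.1 hy.2 hz.1 hz.2
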